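-- pv_equiv track=rewrite | github.com/QuipNetwork/quip-protocol | tutte/cotree_dp/combinatorics.py | _cellsel_compute
-- ===== SOURCE A (Python) =====
-- from math import comb
-- from typing import Dict, List, Tuple
--
-- def _cellsel_compute(
--     cell_sizes: List[int],
--     num_cells: int,
--     total_to_select: int,
-- ) -> int:
--     """Core CellSel DP (uncached).
--
--     Separated from cellsel() so the cache logic doesn't clutter the algorithm.
--     """
--     # DP: ways_prev[selected] = number of ways to select `selected` elements
--     # from the first `cell_idx` cells with at least one from each cell.
--     ways_prev = [0] * (total_to_select + 1)
--     for selected in range(1, min(cell_sizes[0], total_to_select) + 1):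
--         ways_prev[selected] = comb(cell_sizes[0], selected)
--
--     cumulative_size = cell_sizes[0]
--
--     for cell_idx in range(1, num_cells):
--         current_cell_size = cell_sizes[cell_idx]
--         cumulative_size += current_cell_size
--         ways_curr = [0] * (total_to_select + 1)
--         for selected in range(cell_idx + 1, min(total_to_select, cumulative_size) + 1):
--             for from_this_cell in range(1, min(selected - cell_idx, current_cell_size) + 1):
--                 ways_curr[selected] += (
--                     ways_prev[selected - from_this_cell]
--                     * comb(current_cell_size, from_this_cell)
--                 )
--         ways_prev = ways_curr
--
--     return ways_prev[total_to_select]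
-- ===== SOURCE B (Python) =====
-- from math import comb
--
--
-- def _cellsel_compute(
--     cell_sizes,
--     num_cells,
--     total_to_select,
-- ):
--     """Inclusion-exclusion re-implementation.
--
--     Count selections of `total_to_select` elements from the cells with at
--     least one per cell as a signed sum of unconstrained selections: for each
--     set of cells forced to contribute nothing, comb(N - excluded, T) weighted
--     by (-1)^|set|.  Terms are grouped by the excluded total, so `signed` maps
--     an excluded total m to the signed number of cell subsets whose sizes sum
--     to m.  The cells considered are cell 0 plus cells 1..num_cells-1 (exactly
--     the cells the DP reads); a non-positive size makes every term cancel,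
--     giving 0, which is the correct count (no way to take >= 1 from that cell).
--     """
--     cells = [cell_sizes[0]] + [cell_sizes[i] for i in range(1, num_cells)]
--     sizes = [max(s, 0) for s in cells]
--     signed = {0: 1}
--     for s in sizes:
--         nxt = {}
--         for m, c in signed.items():
--             nxt[m] = nxt.get(m, 0) + c
--             nxt[m + s] = nxt.get(m + s, 0) - c
--         signed = {m: c for m, c in nxt.items() if c}
--     n_total = sum(sizes)
--     return sum(c * comb(n_total - m, total_to_select) for m, c in signed.items())
-- ===== Notes on version B (the rewrite author's own statement) =====
-- stated objective: alternative
-- what changed: Replaced the per-cell convolution DP over the number of selected elements by inclusion-exclusion over the set of cells forced to contribute nothing, with the signed terms grouped by the excluded size total, so the answer is a signed sum of unconstrained binomial counts instead of a (T+1)-wide DP table per cell.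
import Mathlib
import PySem

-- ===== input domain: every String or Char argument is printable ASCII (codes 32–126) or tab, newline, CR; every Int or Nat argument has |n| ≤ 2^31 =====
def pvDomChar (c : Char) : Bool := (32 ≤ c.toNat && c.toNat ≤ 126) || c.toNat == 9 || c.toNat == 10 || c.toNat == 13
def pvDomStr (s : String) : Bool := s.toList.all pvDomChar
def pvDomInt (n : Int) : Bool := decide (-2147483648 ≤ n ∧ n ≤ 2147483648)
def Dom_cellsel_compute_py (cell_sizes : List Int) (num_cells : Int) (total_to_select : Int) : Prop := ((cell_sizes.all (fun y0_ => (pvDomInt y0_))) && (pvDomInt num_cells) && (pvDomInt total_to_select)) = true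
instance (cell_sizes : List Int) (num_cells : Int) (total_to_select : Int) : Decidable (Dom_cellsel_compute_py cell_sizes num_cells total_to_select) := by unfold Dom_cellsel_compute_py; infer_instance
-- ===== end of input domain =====

-- B replaces A's per-cell convolution DP by inclusion–exclusion over the cells forced to
-- contribute nothing, with the signed terms grouped by the excluded size total.

-- math.comb n k.  Python raises ValueError on a negative argument; under Pre_ neither
-- program ever calls it with one (the surrounding ranges are empty there), so the
-- 0 branch is unreachable on the admitted inputs.
def pyComb (n k : Int) : Int :=
  if 0 ≤ n ∧ 0 ≤ k then (n.toNat.choose k.toNat : Int) else 0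

-- ===== PORT A =====
-- literal transliteration of _cellsel_compute: ways_prev DP, one convolution per cell.
-- (the loop bodies are named aInit/aStep so the proofs below can speak about them)

-- 'ways_prev = [0]*(total+1); for selected in range(1, min(cell_sizes[0], total)+1): ways_prev[selected] = comb(...)'
def aInit (cell_sizes : List Int) (total_to_select : Int) : List Int :=
  (PySem.List.pyRange 1 (min (PySem.List.pyGetD cell_sizes 0 0) total_to_select + 1) 1).foldl
    (fun w selected => PySem.List.pySetD w selected (pyComb (PySem.List.pyGetD cell_sizes 0 0) selected))
    (List.replicate (total_to_select + 1).toNat 0)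

-- the body of 'for cell_idx in range(1, num_cells)': state = (ways_prev, cumulative_size)
def aStep (cell_sizes : List Int) (total_to_select : Int) (st : List Int × Int) (cell_idx : Int) :
    List Int × Int :=
  let ways_prev := st.1
  let current_cell_size : Int := PySem.List.pyGetD cell_sizes cell_idx 0
  let cumulative_size := st.2 + current_cell_size
  let ways_curr : List Int :=
    (PySem.List.pyRange (cell_idx + 1) (min total_to_select cumulative_size + 1) 1).foldl
      (fun wc selected =>
        (PySem.List.pyRange 1 (min (selected - cell_idx) current_cell_size + 1) 1).foldl
          (fun wc from_this_cell =>
            PySem.List.pySetD wc selected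
              (PySem.List.pyGetD wc selected 0 +
                PySem.List.pyGetD ways_prev (selected - from_this_cell) 0 *
                  pyComb current_cell_size from_this_cell))
          wc)
      (List.replicate (total_to_select + 1).toNat 0)
  (ways_curr, cumulative_size)

def cellsel_compute_py (cell_sizes : List Int) (num_cells : Int) (total_to_select : Int) : Int :=
  -- run the per-cell loop from (initial DP row, cumulative_size = cell_sizes[0]),
  -- return ways_prev[total_to_select]
  PySem.List.pyGetD
    ((PySem.List.pyRange 1 num_cells 1).foldl (aStep cell_sizes total_to_select)
      (aInit cell_sizes total_to_select, PySem.List.pyGetD cell_sizes 0 0)).1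
    total_to_select 0

-- ===== PORT B =====
-- literal transliteration of Source B: signed subset sums of the (clamped) cell sizes,
-- then a signed sum of unconstrained binomial counts.

-- body of 'for s in sizes': nxt = {}; for m, c in signed.items(): nxt[m] += c; nxt[m+s] -= c;
-- signed = {m: c for m, c in nxt.items() if c}
def bStep (signed : PySem.Dict Int Int) (s : Int) : PySem.Dict Int Int :=
  let nxt : PySem.Dict Int Int :=
    signed.items.foldl
      (fun (nxt : PySem.Dict Int Int) mc =>
        let nxt' := nxt.insert mc.1 (nxt.getD mc.1 0 + mc.2)
        nxt'.insert (mc.1 + s) (nxt'.getD (mc.1 + s) 0 - mc.2))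
      PySem.Dict.empty
  nxt.items.foldl
    (fun (d : PySem.Dict Int Int) mc => if mc.2 ≠ 0 then d.insert mc.1 mc.2 else d)
    PySem.Dict.empty

def cellsel_compute_py_alt (cell_sizes : List Int) (num_cells : Int) (total_to_select : Int) : Int :=
  -- cells = [cell_sizes[0]] + [cell_sizes[i] for i in range(1, num_cells)]
  let cells : List Int :=
    PySem.List.pyGetD cell_sizes 0 0 ::
      (PySem.List.pyRange 1 num_cells 1).map (fun i => PySem.List.pyGetD cell_sizes i 0)
  -- sizes = [max(s, 0) for s in cells]
  let sizes : List Int := cells.map (fun s => max s 0)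
  -- signed = {0: 1}; for s in sizes: ... (bStep)
  let signed : PySem.Dict Int Int := sizes.foldl bStep (PySem.Dict.mk [(0, 1)])
  -- n_total = sum(sizes); return sum(c * comb(n_total - m, total_to_select) for m, c in signed.items())
  let n_total : Int := sizes.sum
  signed.items.foldl (fun acc mc => acc + mc.2 * pyComb (n_total - mc.1) total_to_select) 0

-- ===== PRECONDITION & SPEC =====
-- Exactly the inputs on which the Python A returns: A raises IndexError on an empty list
-- (cell_sizes[0]), on num_cells > len(cell_sizes) (cell_sizes[cell_idx]), and on a negative
-- total_to_select (ways_prev[total_to_select] on a too-short list).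
def Pre_cellsel_compute_py (cell_sizes : List Int) (num_cells : Int) (total_to_select : Int) : Prop :=
  cell_sizes ≠ [] ∧ 0 ≤ total_to_select ∧ num_cells ≤ (cell_sizes.length : Int)
instance (cell_sizes : List Int) (num_cells : Int) (total_to_select : Int) : Decidable (Pre_cellsel_compute_py cell_sizes num_cells total_to_select) := by unfold Pre_cellsel_compute_py; infer_instance

def pvWitness_cellsel_compute_py : List Int × Int × Int := ([2, 3], 2, 3)

def Spec_cellsel_compute_py (cell_sizes : List Int) (num_cells : Int) (total_to_select : Int) (out : Int) : Prop := out = cellsel_compute_py_alt cell_sizes num_cells total_to_select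
instance (cell_sizes : List Int) (num_cells : Int) (total_to_select : Int) (out : Int) : Decidable (Spec_cellsel_compute_py cell_sizes num_cells total_to_select out) := by unfold Spec_cellsel_compute_py; infer_instance

-- ===== CLAIM (what is proved, stated in full; the proofs are below) =====
def Claim_equal_cellsel_compute_py : Prop := ∀ (cell_sizes : List Int) (num_cells : Int) (total_to_select : Int), Dom_cellsel_compute_py cell_sizes num_cells total_to_select → Pre_cellsel_compute_py cell_sizes num_cells total_to_select → Spec_cellsel_compute_py cell_sizes num_cells total_to_select (cellsel_compute_py cell_sizes num_cells total_to_select)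

-- ===== LEMMAS AND PROOFS =====

-- The common mathematical reference: G l t = number of ways to select t elements from
-- cells of sizes l with at least one element from each cell (coefficient of x^t in
-- the product of ((1+x)^s - 1) over s ∈ l).
def G : List Nat → Nat → Nat
  | [], t => if t = 0 then 1 else 0
  | s :: l, t => ∑ k ∈ Finset.range t, s.choose (k + 1) * G l (t - (k + 1))

-- Signed inclusion–exclusion sum: IE l f = ∑ over subsets S of l of (-1)^|S| · f (ΣS).
def IE : List Nat → (Nat → Int) → Int
  | [], f => f 0
  | s :: l, f => IE l f - IE l (fun m => f (m + s))

theorem G_eq_zero_of_lt_length (l : List Nat) (t : Nat) (h : t < l.length) : G l t = 0 := by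
  induction l generalizing t with
  | nil => simp at h
  | cons s l ih =>
    simp only [G]
    refine Finset.sum_eq_zero fun k hk => ?_
    simp only [Finset.mem_range] at hk
    simp only [List.length_cons] at h
    rw [ih _ (by omega)]
    simp

theorem G_eq_zero_of_sum_lt (l : List Nat) (t : Nat) (h : l.sum < t) : G l t = 0 := by
  induction l generalizing t with
  | nil => simp only [G, List.sum_nil] at h ⊢; rw [if_neg (by omega)]
  | cons s l ih =>
    simp only [G]
    refine Finset.sum_eq_zero fun k hk => ?_
    simp only [List.sum_cons] at h
    by_cases hks : k + 1 ≤ s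
    · rw [ih _ (by omega)]; simp
    · rw [Nat.choose_eq_zero_of_lt (by omega)]; simp

theorem G_eq_zero_of_zero_mem (l : List Nat) (t : Nat) (h : 0 ∈ l) : G l t = 0 := by
  induction l generalizing t with
  | nil => simp at h
  | cons s l ih =>
    simp only [G]
    refine Finset.sum_eq_zero fun k hk => ?_
    rcases List.mem_cons.mp h with h0 | h0
    · subst h0; simp [Nat.choose_eq_zero_of_lt]
    · rw [ih _ h0]; simp

theorem G_singleton (σ j : Nat) : G [σ] j = if 1 ≤ j then σ.choose j else 0 := by
  cases j with
  | zero => simp [G]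
  | succ j =>
    simp only [G]
    rw [Finset.sum_eq_single j]
    · simp
    · intro k hk hkj
      simp only [Finset.mem_range] at hk
      have : j + 1 - (k + 1) ≠ 0 := by omega
      simp only [if_neg this, Nat.mul_zero]
    · simp

-- Vandermonde, in the range form used below.
theorem vandermonde_range (s M t : Nat) :
    (s + M).choose t = ∑ k ∈ Finset.range (t + 1), s.choose k * M.choose (t - k) := by
  rw [Nat.add_choose_eq]
  rw [Finset.Nat.sum_antidiagonal_eq_sum_range_succ_mk]

theorem IE_congr_on (l : List Nat) (f g : Nat → Int) (h : ∀ m, m ≤ l.sum → f m = g m) :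
    IE l f = IE l g := by
  induction l generalizing f g with
  | nil => simpa using h 0 (by simp)
  | cons s l ih =>
    simp only [IE, List.sum_cons] at h ⊢
    rw [ih f g (fun m hm => h m (by omega)),
        ih (fun m => f (m + s)) (fun m => g (m + s)) (fun m hm => h (m + s) (by omega))]

theorem IE_sum (l : List Nat) (F : Finset ℕ) (h : ℕ → Nat → Int) :
    IE l (fun m => ∑ k ∈ F, h k m) = ∑ k ∈ F, IE l (fun m => h k m) := by
  induction l generalizing h with
  | nil => simp [IE]
  | cons s l ih =>
    simp only [IE]
    rw [ih h, ih (fun k m => h k (m + s))]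
    rw [← Finset.sum_sub_distrib]

theorem IE_mul (l : List Nat) (c : Int) (h : Nat → Int) :
    IE l (fun m => c * h m) = c * IE l h := by
  induction l generalizing h with
  | nil => simp [IE]
  | cons s l ih =>
    simp only [IE]
    rw [ih h, ih (fun m => h (m + s))]
    ring

theorem IE_append_singleton (l : List Nat) (s : Nat) (f : Nat → Int) :
    IE (l ++ [s]) f = IE l f - IE l (fun m => f (m + s)) := by
  induction l generalizing f with
  | nil => simp [IE]
  | cons a l ih =>
    simp only [List.cons_append, IE]
    rw [ih f, ih (fun m => f (m + a))]
    have : (fun m => f (m + s + a)) = fun m => f (m + a + s) := by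
      funext m; congr 1; omega
    rw [this]
    ring

theorem IE_reverse (l : List Nat) (f : Nat → Int) : IE l.reverse f = IE l f := by
  induction l generalizing f with
  | nil => rfl
  | cons s l ih =>
    simp only [List.reverse_cons, IE]
    rw [IE_append_singleton, ih f, ih (fun m => f (m + s))]

-- The DP count equals the inclusion–exclusion sum.
theorem G_eq_IE (l : List Nat) (t : Nat) :
    (G l t : Int) = IE l (fun m => ((l.sum - m).choose t : Int)) := by
  induction l generalizing t with
  | nil =>
    simp only [IE, List.sum_nil, Nat.zero_sub, G]
    cases t <;> simp
  | cons s l ih =>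
    simp only [IE, List.sum_cons]
    have h2 : IE l (fun m => (((s + l.sum) - (m + s)).choose t : Int))
        = IE l (fun m => ((l.sum - m).choose t : Int)) := by
      apply IE_congr_on; intro m _
      congr 2; omega
    have h1 : IE l (fun m => (((s + l.sum) - m).choose t : Int))
        = ∑ k ∈ Finset.range (t + 1), (s.choose k : Int) * (G l (t - k) : Int) := by
      rw [IE_congr_on l _ (fun m => ∑ k ∈ Finset.range (t + 1),
            (s.choose k : Int) * (((l.sum - m).choose (t - k) : Nat) : Int))]
      · rw [IE_sum]
        refine Finset.sum_congr rfl fun k _ => ?_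
        rw [IE_mul, ← ih (t - k)]
      · intro m hm
        have : s + l.sum - m = s + (l.sum - m) := by omega
        rw [this, vandermonde_range]
        push_cast
        rfl
    rw [h1, h2, ← ih t]
    rw [Finset.sum_range_succ']
    simp only [Nat.choose_zero_right, Nat.cast_one, one_mul, Nat.sub_zero]
    simp only [G]
    push_cast
    ring

-- ===== A-side loop lemmas =====

theorem pySetD_out (xs : List Int) (i v : Int) (h : ¬ PySem.Raise.InRange xs.length i) :
    PySem.List.pySetD xs i v = xs := by
  unfold PySem.List.pySetD
  rw [(PySem.List.pySet?_eq_none_iff xs i v).mpr h, Option.getD_none]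

theorem inRange_iff (len : Nat) (i : Int) :
    PySem.Raise.InRange len i ↔ -(len:Int) ≤ i ∧ i < len := Iff.rfl

theorem getD_setD_self (wc : List Int) (n : Nat) (v : Int) (hn : n < wc.length) :
    PySem.List.pyGetD (PySem.List.pySetD wc (n : Int) v) (n : Int) 0 = v := by
  rw [PySem.List.pyGetD_pySetD_natCast wc n n _ _ hn, if_pos rfl]

theorem getD_setD_ne (wc : List Int) (n m : Nat) (v : Int) (hn : n < wc.length) (h : m ≠ n) :
    PySem.List.pyGetD (PySem.List.pySetD wc (n : Int) v) (m : Int) 0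
      = PySem.List.pyGetD wc (m : Int) 0 := by
  rw [PySem.List.pyGetD_pySetD_natCast wc n m _ _ hn, if_neg h]

theorem getD_replicate (L : Nat) (x : Int) :
    PySem.List.pyGetD (List.replicate L (0 : Int)) x 0 = 0 := by
  have hdef : PySem.List.pyGetD (List.replicate L (0 : Int)) x 0
      = (PySem.List.pyGet? (List.replicate L (0 : Int)) x).getD 0 := rfl
  rw [hdef]
  cases h : PySem.List.pyGet? (List.replicate L (0 : Int)) x with
  | none => rfl
  | some v =>
    have := PySem.List.mem_of_pyGet?_eq_some _ h
    rw [List.eq_of_mem_replicate this]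
    rfl

-- innermost loop of A: repeated '+=' at one fixed index collapses to one write of the sum
theorem addSet_foldl (ks : List Int) (wc : List Int) (sel : Int) (hsel : 0 ≤ sel) (g : Int → Int) :
    ks.foldl (fun w k => PySem.List.pySetD w sel (PySem.List.pyGetD w sel 0 + g k)) wc
      = if ks = [] then wc
        else PySem.List.pySetD wc sel (PySem.List.pyGetD wc sel 0 + (ks.map g).sum) := by
  induction ks generalizing wc with
  | nil => simp
  | cons k ks ih =>
    simp only [List.foldl_cons, ih, List.map_cons, List.sum_cons, if_neg (List.cons_ne_nil k ks)]
    by_cases hr : sel < (wc.length : Int)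
    · have hn : sel.toNat < wc.length := by omega
      have hcast : sel = ((sel.toNat : Nat) : Int) := by omega
      rw [hcast]
      split_ifs with he
      · subst he; simp only [List.map_nil, List.sum_nil, add_zero]
      · rw [getD_setD_self wc sel.toNat _ hn]
        rw [PySem.List.pySetD_of_nonneg _ _ (by positivity),
            PySem.List.pySetD_of_nonneg _ _ (by positivity),
            PySem.List.pySetD_of_nonneg _ _ (by positivity)]
        rw [Int.toNat_natCast, List.set_set]
        ring_nf
    · have hout : ¬ PySem.Raise.InRange wc.length sel := by rw [inRange_iff]; omega
      split_ifs with he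
      · rw [pySetD_out _ _ _ hout, pySetD_out _ _ _ hout]
      · rw [pySetD_out _ _ _ hout, pySetD_out _ _ _ hout]
        have : (PySem.List.pySetD wc sel (PySem.List.pyGetD wc sel 0 + g k)).length = wc.length :=
          PySem.List.length_pySetD _ _ _
        rw [pySetD_out _ _ _ (by rw [this] at *; exact hout)]

theorem writeFold_length (sels : List Int) (w : List Int) (val : Int → Int) :
    (sels.foldl (fun w sel => PySem.List.pySetD w sel (val sel)) w).length = w.length := by
  induction sels generalizing w with
  | nil => rfl
  | cons s sels ih => simp only [List.foldl_cons, ih, PySem.List.length_pySetD]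

theorem writeFold_getD (sels : List Int) (hnd : sels.Nodup) (w : List Int) (val : Int → Int)
    (hw : ∀ s ∈ sels, 0 ≤ s ∧ s < (w.length : Int)) (j : Nat) :
    PySem.List.pyGetD (sels.foldl (fun w sel => PySem.List.pySetD w sel (val sel)) w) (j : Int) 0
      = if (j : Int) ∈ sels then val (j : Int) else PySem.List.pyGetD w (j : Int) 0 := by
  induction sels generalizing w with
  | nil => simp
  | cons sel sels ih =>
    have hs := hw sel List.mem_cons_self
    have hn : sel.toNat < w.length := by omega
    have hcast : sel = ((sel.toNat : Nat) : Int) := by omega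
    have hw' : ∀ s ∈ sels, 0 ≤ s ∧ s < ((PySem.List.pySetD w sel (val sel)).length : Int) := by
      intro s hs'
      rw [PySem.List.length_pySetD]
      exact hw s (List.mem_cons_of_mem _ hs')
    simp only [List.foldl_cons]
    rw [ih hnd.of_cons _ hw']
    by_cases hmem : (j : Int) ∈ sels
    · rw [if_pos hmem, if_pos (List.mem_cons_of_mem _ hmem)]
    · rw [if_neg hmem]
      by_cases hj : (j : Int) = sel
      · rw [if_pos (by simp [hj])]
        rw [hcast] at hj ⊢
        rw [hj]
        exact getD_setD_self w sel.toNat _ hn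
      · rw [if_neg (by simp [hj, hmem])]
        rw [hcast] at hj ⊢
        exact getD_setD_ne w sel.toNat j _ hn (by exact_mod_cast hj)

-- variant where each write also reads the (so far unmodified) cell it writes
theorem writeFoldAdd_getD (sels : List Int) (hnd : sels.Nodup) (w : List Int) (val : Int → Int)
    (hw : ∀ s ∈ sels, 0 ≤ s ∧ s < (w.length : Int)) (j : Nat) :
    PySem.List.pyGetD
      (sels.foldl (fun w sel => PySem.List.pySetD w sel (PySem.List.pyGetD w sel 0 + val sel)) w)
      (j : Int) 0
      = if (j : Int) ∈ sels then PySem.List.pyGetD w (j : Int) 0 + val (j : Int)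
        else PySem.List.pyGetD w (j : Int) 0 := by
  induction sels generalizing w with
  | nil => simp
  | cons sel sels ih =>
    have hs := hw sel List.mem_cons_self
    have hn : sel.toNat < w.length := by omega
    have hcast : sel = ((sel.toNat : Nat) : Int) := by omega
    set w1 := PySem.List.pySetD w sel (PySem.List.pyGetD w sel 0 + val sel) with hw1
    have hw' : ∀ s ∈ sels, 0 ≤ s ∧ s < (w1.length : Int) := by
      intro s hs'
      rw [hw1, PySem.List.length_pySetD]
      exact hw s (List.mem_cons_of_mem _ hs')
    simp only [List.foldl_cons]
    rw [ih hnd.of_cons _ hw']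
    by_cases hmem : (j : Int) ∈ sels
    · rw [if_pos hmem, if_pos (List.mem_cons_of_mem _ hmem)]
      have hjsel : (j : Int) ≠ sel := by
        intro he
        exact (List.nodup_cons.mp hnd).1 (he ▸ hmem)
      rw [hw1, hcast]
      rw [getD_setD_ne w sel.toNat j _ hn (by rw [hcast] at hjsel; exact_mod_cast hjsel)]
    · rw [if_neg hmem]
      by_cases hj : (j : Int) = sel
      · rw [if_pos (by simp [hj])]
        rw [hw1, hcast] at *
        rw [hj]
        exact getD_setD_self w sel.toNat _ hn
      · rw [if_neg (by simp [hj, hmem])]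
        rw [hw1, hcast] at *
        exact getD_setD_ne w sel.toNat j _ hn (by exact_mod_cast hj)

theorem sum_map_pyRange_one (K : Nat) (g : Int → Int) :
    ((PySem.List.pyRange 1 ((K : Int) + 1) 1).map g).sum
      = ∑ k ∈ Finset.range K, g (1 + (k : Int)) := by
  rw [PySem.List.pyRange_one]
  have : ((K : Int) + 1 - 1).toNat = K := by omega
  rw [this, List.map_map]
  clear this
  induction K with
  | zero => simp
  | succ n ih =>
    rw [List.range_succ, Finset.sum_range_succ, List.map_append, List.sum_append, ih]
    simp [Function.comp]

-- ===== B-side dict lemmas =====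

-- weighted sum of an items list against f
def wsum (l : List (Int × Int)) (f : Int → Int) : Int :=
  (l.map (fun mc => mc.2 * f mc.1)).sum

theorem wsum_append (l1 l2 : List (Int × Int)) (f : Int → Int) :
    wsum (l1 ++ l2) f = wsum l1 f + wsum l2 f := by
  simp [wsum]

theorem wsum_replace (l : List (Int × Int)) (hnd : (l.map Prod.fst).Nodup)
    (k old c : Int) (f : Int → Int) (hmem : (k, old) ∈ l) :
    wsum (l.map (fun p => if p.1 == k then (k, old + c) else p)) f = wsum l f + c * f k := by
  induction l with
  | nil => simp at hmem
  | cons p l ih =>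
    simp only [List.map_cons, List.nodup_cons] at hnd
    rcases List.mem_cons.mp hmem with h | h
    · subst h
      simp only [List.map_cons, BEq.rfl, if_pos]
      have hid : l.map (fun p => if p.1 == k then (k, old + c) else p) = l := by
        conv_rhs => rw [← List.map_id l]
        apply List.map_congr_left
        intro q hq
        have hqm : q.1 ∈ l.map Prod.fst := List.mem_map_of_mem hq
        have : q.1 ≠ k := fun he => hnd.1 (he ▸ hqm)
        simp [this]
      rw [hid]
      simp only [wsum, List.map_cons, List.sum_cons]
      ring
    · have hpk : p.1 ≠ k := by
        intro he
        apply hnd.1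
        rw [he]
        exact List.mem_map_of_mem (f := Prod.fst) h
      have hcond : ¬ ((p.1 == k) = true) := by
        intro hc; exact hpk (beq_iff_eq.mp hc)
      simp only [List.map_cons, if_neg hcond]
      simp only [wsum, List.map_cons, List.sum_cons]
      have := ih hnd.2 h
      simp only [wsum] at this
      rw [this]
      ring

theorem wsum_bump (d : PySem.Dict Int Int) (hnd : d.keys.Nodup) (k c : Int) (f : Int → Int) :
    wsum (d.insert k (d.getD k 0 + c)).items f = wsum d.items f + c * f k := by
  by_cases h : d.contains k
  · have hsome : d.get? k = some (d.getD k 0) := by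
      rw [PySem.Dict.contains_eq_isSome_get?] at h
      rcases Option.isSome_iff_exists.mp h with ⟨v, hv⟩
      rw [hv, PySem.Dict.getD_of_get?_eq_some d 0 hv]
    have hmem : (k, d.getD k 0) ∈ d.items := PySem.Dict.mem_items_of_get?_eq_some _ hsome
    rw [PySem.Dict.items_insert_of_contains _ _ h]
    exact wsum_replace d.items hnd k _ c f hmem
  · have h0 : d.getD k 0 = 0 := PySem.Dict.getD_of_not_contains d 0 (by simpa using h)
    rw [PySem.Dict.items_insert_of_not_contains _ _ (by simpa using h), wsum_append, h0]
    simp [wsum]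

theorem nxt_fold (s : Int) (l : List (Int × Int)) :
    ∀ (n0 : PySem.Dict Int Int), n0.keys.Nodup →
      ((l.foldl (fun (nxt : PySem.Dict Int Int) mc =>
          let nxt' := nxt.insert mc.1 (nxt.getD mc.1 0 + mc.2)
          nxt'.insert (mc.1 + s) (nxt'.getD (mc.1 + s) 0 - mc.2)) n0).keys.Nodup ∧
       ∀ f : Int → Int,
         wsum (l.foldl (fun (nxt : PySem.Dict Int Int) mc =>
            let nxt' := nxt.insert mc.1 (nxt.getD mc.1 0 + mc.2)
            nxt'.insert (mc.1 + s) (nxt'.getD (mc.1 + s) 0 - mc.2)) n0).items f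
           = wsum n0.items f + wsum l f - wsum l (fun m => f (m + s))) := by
  induction l with
  | nil => intro n0 h; exact ⟨h, fun f => by simp [wsum]⟩
  | cons mc l ih =>
    intro n0 h
    simp only [List.foldl_cons]
    have h1 : (n0.insert mc.1 (n0.getD mc.1 0 + mc.2)).keys.Nodup :=
      PySem.Dict.nodup_keys_insert _ _ _ h
    set n1 := n0.insert mc.1 (n0.getD mc.1 0 + mc.2) with hn1
    have h2 : (n1.insert (mc.1 + s) (n1.getD (mc.1 + s) 0 - mc.2)).keys.Nodup :=
      PySem.Dict.nodup_keys_insert _ _ _ h1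
    obtain ⟨hk, hw⟩ := ih _ h2
    refine ⟨hk, fun f => ?_⟩
    rw [hw f]
    have e2 : wsum (n1.insert (mc.1 + s) (n1.getD (mc.1 + s) 0 - mc.2)).items f
        = wsum n1.items f + (-mc.2) * f (mc.1 + s) := by
      rw [sub_eq_add_neg]
      exact wsum_bump n1 h1 (mc.1 + s) (-mc.2) f
    have e1 : wsum n1.items f = wsum n0.items f + mc.2 * f mc.1 :=
      wsum_bump n0 h (mc.1) (mc.2) f
    rw [e2, e1]
    simp only [wsum, List.map_cons, List.sum_cons]
    ring

theorem prune_fold (l : List (Int × Int)) :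
    ∀ (acc : PySem.Dict Int Int), acc.keys.Nodup → (∀ p ∈ l, acc.contains p.1 = false) →
      (l.map Prod.fst).Nodup →
      ∀ f : Int → Int,
        wsum ((l.foldl (fun (d : PySem.Dict Int Int) mc =>
            if mc.2 ≠ 0 then d.insert mc.1 mc.2 else d) acc)).items f
          = wsum acc.items f + wsum l f := by
  induction l with
  | nil => intro acc _ _ _ f; simp [wsum]
  | cons p l ih =>
    intro acc hnd hfresh hl f
    simp only [List.map_cons, List.nodup_cons] at hl
    simp only [List.foldl_cons]
    by_cases hz : p.2 ≠ 0
    · rw [if_pos hz]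
      have hc : acc.contains p.1 = false := hfresh p List.mem_cons_self
      have hfresh' : ∀ q ∈ l, (acc.insert p.1 p.2).contains q.1 = false := by
        intro q hq
        rw [PySem.Dict.contains_insert]
        have : q.1 ≠ p.1 := by
          intro he
          exact hl.1 (he ▸ List.mem_map_of_mem (f := Prod.fst) hq)
        simp [this, hfresh q (List.mem_cons_of_mem _ hq)]
      rw [ih _ (PySem.Dict.nodup_keys_insert _ _ _ hnd) hfresh' hl.2 f,
          PySem.Dict.items_insert_of_not_contains _ _ hc, wsum_append]
      simp only [wsum, List.map_cons, List.map_nil, List.sum_cons, List.sum_nil]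
      ring
    · rw [if_neg hz]
      rw [not_not] at hz
      rw [ih _ hnd (fun q hq => hfresh q (List.mem_cons_of_mem _ hq)) hl.2 f]
      simp only [wsum, List.map_cons, List.sum_cons, hz]
      ring

theorem prune_nodup (l : List (Int × Int)) :
    ∀ (acc : PySem.Dict Int Int), acc.keys.Nodup →
      ((l.foldl (fun (d : PySem.Dict Int Int) mc =>
          if mc.2 ≠ 0 then d.insert mc.1 mc.2 else d) acc)).keys.Nodup := by
  induction l with
  | nil => intro acc h; exact h
  | cons p l ih =>
    intro acc h
    simp only [List.foldl_cons]
    by_cases hz : p.2 ≠ 0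
    · rw [if_pos hz]; exact ih _ (PySem.Dict.nodup_keys_insert _ _ _ h)
    · rw [if_neg hz]; exact ih _ h

-- one bStep in terms of wsum
theorem keys_eq_items_map_fst (d : PySem.Dict Int Int) : d.keys = d.items.map Prod.fst := rfl

theorem bStep_spec (d : PySem.Dict Int Int) (hnd : d.keys.Nodup) (s : Int) :
    (bStep d s).keys.Nodup ∧
      ∀ f : Int → Int, wsum (bStep d s).items f
        = wsum d.items f - wsum d.items (fun m => f (m + s)) := by
  unfold bStep
  obtain ⟨hknxt, hwnxt⟩ := nxt_fold s d.items PySem.Dict.empty (by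
    rw [keys_eq_items_map_fst]
    simp [PySem.Dict.empty])
  set nxt := d.items.foldl
      (fun (nxt : PySem.Dict Int Int) mc =>
        let nxt' := nxt.insert mc.1 (nxt.getD mc.1 0 + mc.2)
        nxt'.insert (mc.1 + s) (nxt'.getD (mc.1 + s) 0 - mc.2))
      PySem.Dict.empty with hnxt
  constructor
  · exact prune_nodup nxt.items PySem.Dict.empty (by
      rw [keys_eq_items_map_fst]; simp [PySem.Dict.empty])
  · intro f
    rw [prune_fold nxt.items PySem.Dict.empty
        (by rw [keys_eq_items_map_fst]; simp [PySem.Dict.empty])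
        (fun p _ => by simp [PySem.Dict.contains_empty])
        (by rw [← keys_eq_items_map_fst]; exact hknxt) f]
    rw [hwnxt f]
    have hempty : wsum (PySem.Dict.empty : PySem.Dict Int Int).items f = 0 := by
      simp [wsum, PySem.Dict.empty]
    rw [hempty]
    ring

-- ===== casting helpers =====

theorem sum_toNat_of_nonneg (l : List Int) (h : ∀ x ∈ l, 0 ≤ x) :
    (((l.map Int.toNat).sum : Nat) : Int) = l.sum := by
  induction l with
  | nil => simp
  | cons x l ih =>
    simp only [List.map_cons, List.sum_cons, Nat.cast_add]
    rw [ih (fun y hy => h y (List.mem_cons_of_mem _ hy))]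
    have := h x List.mem_cons_self
    omega

theorem sum_clamp_eq (l : List Int) (h : ∀ x ∈ l, 1 ≤ x) :
    (((l.map (fun x => (max x 0).toNat)).sum : Nat) : Int) = l.sum := by
  induction l with
  | nil => simp
  | cons x l ih =>
    simp only [List.map_cons, List.sum_cons, Nat.cast_add]
    rw [ih (fun y hy => h y (List.mem_cons_of_mem _ hy))]
    have := h x List.mem_cons_self
    omega

-- ===== the two program characterizations =====

-- B's dict fold: after processing sizes (all ≥ 0), the weighted item sum is the signed
-- subset-sum aggregate IE over the sizes (as naturals).
theorem b_fold_inv (l : List Int) (hl : ∀ x ∈ l, 0 ≤ x) :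
    ∀ (p : List Nat) (d : PySem.Dict Int Int), d.keys.Nodup →
      (∀ f : Int → Int, wsum d.items f = IE p (fun m => f (m : Int))) →
      ((l.foldl bStep d).keys.Nodup ∧
        ∀ f : Int → Int, wsum (l.foldl bStep d).items f
          = IE (p ++ l.map Int.toNat) (fun m => f (m : Int))) := by
  induction l with
  | nil => intro p d hnd hinv; simpa using ⟨hnd, hinv⟩
  | cons x l ih =>
    intro p d hnd hinv
    have hx : 0 ≤ x := hl x List.mem_cons_self
    have hl' : ∀ y ∈ l, 0 ≤ y := fun y hy => hl y (List.mem_cons_of_mem _ hy)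
    simp only [List.foldl_cons]
    obtain ⟨hnd', hstep⟩ := bStep_spec d hnd x
    have hinv' : ∀ f : Int → Int,
        wsum (bStep d x).items f = IE (p ++ [x.toNat]) (fun m => f (m : Int)) := by
      intro f
      rw [hstep f, IE_append_singleton]
      rw [hinv f, hinv (fun m => f (m + x))]
      have : (fun m : Nat => f ((m + x.toNat : Nat) : Int)) = fun m : Nat => f ((m : Int) + x) := by
        funext m
        congr 1
        omega
      rw [this]
    have := ih hl' (p ++ [x.toNat]) (bStep d x) hnd' hinv'
    rw [List.append_assoc] at this
    simpa using this

-- the cell values A's loop reads, and their clamped Nat sizes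
def aCells (cell_sizes : List Int) (b : Int) : List Int :=
  PySem.List.pyGetD cell_sizes 0 0 ::
    (PySem.List.pyRange 1 b 1).map (fun i => PySem.List.pyGetD cell_sizes i 0)

def clampList (l : List Int) : List Nat := l.map (fun x => (max x 0).toNat)

theorem foldl_length_pres {β : Type} (l : List β) (F : List Int → β → List Int)
    (h : ∀ w x, (F w x).length = w.length) :
    ∀ w : List Int, (l.foldl F w).length = w.length := by
  induction l with
  | nil => intro w; rfl
  | cons x l ih => intro w; rw [List.foldl_cons, ih, h]

theorem foldl_id {β : Type} (l : List β) (w : List Int) :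
    (l.foldl (fun acc (_ : β) => acc) w) = w := by
  induction l with
  | nil => rfl
  | cons x l ih => rw [List.foldl_cons]; exact ih

-- the initial DP row of A
theorem aInit_getD (cell_sizes : List Int) (t : Int) (ht : 0 ≤ t) (j : Nat) (hj : j ≤ t.toNat) :
    PySem.List.pyGetD (aInit cell_sizes t) (j : Int) 0
      = ((G (clampList [PySem.List.pyGetD cell_sizes 0 0]).reverse j : Nat) : Int) := by
  set s0 := PySem.List.pyGetD cell_sizes 0 0 with hs0
  have hlenrep : (List.replicate (t + 1).toNat (0 : Int)).length = (t + 1).toNat :=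
    List.length_replicate
  unfold aInit
  rw [writeFold_getD _ (PySem.List.nodup_pyRange_one _ _) _ _ ?hw j]
  case hw =>
    intro x hx
    rw [PySem.List.mem_pyRange_one] at hx
    rw [hlenrep]
    omega
  rw [getD_replicate]
  have hrev : (clampList [s0]).reverse = [(max s0 0).toNat] := by simp [clampList]
  rw [hrev, G_singleton]
  by_cases hmem : (j : Int) ∈ PySem.List.pyRange 1 (min s0 t + 1) 1
  · rw [if_pos hmem]
    rw [PySem.List.mem_pyRange_one] at hmem
    have h1j : 1 ≤ j := by omega
    have hs0pos : 1 ≤ s0 := by omega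
    rw [if_pos h1j]
    unfold pyComb
    rw [if_pos (by omega)]
    have : max s0 0 = s0 := by omega
    rw [this, Int.toNat_natCast]
  · rw [if_neg hmem]
    rw [PySem.List.mem_pyRange_one] at hmem
    by_cases h1j : 1 ≤ j
    · rw [if_pos h1j]
      have : (max s0 0).toNat < j := by omega
      rw [Nat.choose_eq_zero_of_lt this]
      rfl
    · rw [if_neg h1j]
      rfl

-- A's main loop invariant: after the cells with indices < 1 + n, the DP row holds G of the
-- clamped prefix (reversed, G peeling the most recent cell first), and the running
-- cumulative size is the raw prefix sum.
theorem a_inv (cell_sizes : List Int) (t : Int) (ht : 0 ≤ t) (n : Nat) :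
    ((PySem.List.pyRange 1 (1 + (n : Int)) 1).foldl (aStep cell_sizes t)
        (aInit cell_sizes t, PySem.List.pyGetD cell_sizes 0 0)).1.length = t.toNat + 1 ∧
    ((PySem.List.pyRange 1 (1 + (n : Int)) 1).foldl (aStep cell_sizes t)
        (aInit cell_sizes t, PySem.List.pyGetD cell_sizes 0 0)).2
      = (aCells cell_sizes (1 + (n : Int))).sum ∧
    ∀ j : Nat, j ≤ t.toNat →
      PySem.List.pyGetD
        ((PySem.List.pyRange 1 (1 + (n : Int)) 1).foldl (aStep cell_sizes t)
          (aInit cell_sizes t, PySem.List.pyGetD cell_sizes 0 0)).1 (j : Int) 0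
        = ((G (clampList (aCells cell_sizes (1 + (n : Int)))).reverse j : Nat) : Int) := by
  induction n with
  | zero =>
    rw [PySem.List.pyRange_one_eq_nil (by omega)]
    simp only [List.foldl_nil]
    refine ⟨?_, ?_, ?_⟩
    · unfold aInit
      rw [writeFold_length, List.length_replicate]
      omega
    · simp [aCells, PySem.List.pyRange_one_eq_nil (by omega : (1:Int) + (0:Nat) ≤ 1)]
    · intro j hj
      have := aInit_getD cell_sizes t ht j hj
      simpa [aCells] using this
  | succ n ih =>
    obtain ⟨hlen, hcum, hG⟩ := ih
    have hsplit : PySem.List.pyRange 1 (1 + ((n + 1 : Nat) : Int)) 1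
        = PySem.List.pyRange 1 (1 + (n : Int)) 1 ++ [1 + (n : Int)] := by
      have h1 : (1 : Int) + ((n + 1 : Nat) : Int) = (1 + (n : Int)) + 1 := by push_cast; ring
      rw [h1, PySem.List.pyRange_one_succ_right (by omega)]
    rw [hsplit, List.foldl_append, List.foldl_cons, List.foldl_nil]
    set i : Int := 1 + (n : Int) with hi
    set st := (PySem.List.pyRange 1 i 1).foldl (aStep cell_sizes t)
      (aInit cell_sizes t, PySem.List.pyGetD cell_sizes 0 0) with hst
    set w := st.1 with hw
    set cum := st.2 with hcum2
    set s : Int := PySem.List.pyGetD cell_sizes i 0 with hvs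
    -- the new cell list
    have hcells : aCells cell_sizes (1 + ((n + 1 : Nat) : Int))
        = aCells cell_sizes i ++ [s] := by
      unfold aCells
      rw [hsplit, List.map_append]
      simp
      rfl
    have hstep : aStep cell_sizes t (w, cum) i
        = ((PySem.List.pyRange (i + 1) (min t (cum + s) + 1) 1).foldl
            (fun wc selected =>
              (PySem.List.pyRange 1 (min (selected - i) s + 1) 1).foldl
                (fun wc from_this_cell =>
                  PySem.List.pySetD wc selected
                    (PySem.List.pyGetD wc selected 0 +
                      PySem.List.pyGetD w (selected - from_this_cell) 0 *
                        pyComb s from_this_cell))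
                wc)
            (List.replicate (t + 1).toNat 0), cum + s) := rfl
    rw [hstep]
    have hlenrep : (List.replicate (t + 1).toNat (0 : Int)).length = t.toNat + 1 := by
      rw [List.length_replicate]; omega
    refine ⟨?_, ?_, ?_⟩
    · -- length
      rw [foldl_length_pres _ _ ?pres, List.length_replicate]
      · omega
      case pres =>
        intro wc sel
        exact foldl_length_pres _ _ (fun w' k => PySem.List.length_pySetD _ _ _) wc
    · -- cumulative size
      rw [hcells, List.sum_append]
      simp [hcum]
    · -- the DP row
      intro j hj
      set σ : Nat := (max s 0).toNat with hσ
      set P : List Nat := (clampList (aCells cell_sizes i)).reverse with hP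
      have hrev : (clampList (aCells cell_sizes (1 + ((n + 1 : Nat) : Int)))).reverse
          = σ :: P := by
        rw [hcells]
        unfold clampList
        rw [List.map_append, List.reverse_append]
        simp [hσ, hP, clampList]
      rw [hrev]
      have hPlen : P.length = 1 + n := by
        rw [hP, List.length_reverse]
        unfold clampList aCells
        simp [PySem.List.length_pyRange_one]
        omega
      -- raw cells and their properties
      have hcellsum : (aCells cell_sizes i).sum = cum := hcum.symm
      -- case on s
      by_cases hs : s ≤ 0
      · -- inner ranges are all empty: the row stays zero, and G vanishes (σ = 0)
        have hzero : (PySem.List.pyRange (i + 1) (min t (cum + s) + 1) 1).foldl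
            (fun wc selected =>
              (PySem.List.pyRange 1 (min (selected - i) s + 1) 1).foldl
                (fun wc from_this_cell =>
                  PySem.List.pySetD wc selected
                    (PySem.List.pyGetD wc selected 0 +
                      PySem.List.pyGetD w (selected - from_this_cell) 0 *
                        pyComb s from_this_cell))
                wc)
            (List.replicate (t + 1).toNat 0) = List.replicate (t + 1).toNat 0 := by
        
          rw [PySem.List.foldl_congr_mem _ _ (fun acc (_ : Int) => acc) _ ?hcongr]
          · exact foldl_id _ _
          case hcongr =>
            intro acc x hx
            rw [PySem.List.mem_pyRange_one] at hx
            rw [PySem.List.pyRange_one_eq_nil (by omega)]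
            rfl
        rw [hzero, getD_replicate]
        have : G (σ :: P) j = 0 :=
          G_eq_zero_of_zero_mem _ _ (by
            have : σ = 0 := by omega
            simp [this])
        rw [this]
        rfl
      · rw [not_le] at hs
        have hs1 : 1 ≤ s := hs
        -- collapse the inner loop, then characterize the writes
        set V : Int → Int := fun sel =>
          ((PySem.List.pyRange 1 (min (sel - i) s + 1) 1).map
            (fun k => PySem.List.pyGetD w (sel - k) 0 * pyComb s k)).sum with hV
        have hcollapse : (PySem.List.pyRange (i + 1) (min t (cum + s) + 1) 1).foldl
            (fun wc selected =>
              (PySem.List.pyRange 1 (min (selected - i) s + 1) 1).foldl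
                (fun wc from_this_cell =>
                  PySem.List.pySetD wc selected
                    (PySem.List.pyGetD wc selected 0 +
                      PySem.List.pyGetD w (selected - from_this_cell) 0 *
                        pyComb s from_this_cell))
                wc)
            (List.replicate (t + 1).toNat 0)
            = (PySem.List.pyRange (i + 1) (min t (cum + s) + 1) 1).foldl
              (fun wc sel => PySem.List.pySetD wc sel (PySem.List.pyGetD wc sel 0 + V sel))
              (List.replicate (t + 1).toNat 0) := by
          apply PySem.List.foldl_congr_mem
          intro acc x hx
          rw [PySem.List.mem_pyRange_one] at hx
          have hxpos : 0 ≤ x := by omega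
          rw [addSet_foldl _ _ _ hxpos]
          rw [if_neg ?hne]
          case hne =>
            intro hnil
            have := congrArg List.length hnil
            rw [PySem.List.length_pyRange_one] at this
            simp at this
            omega
        rw [hcollapse]
        rw [writeFoldAdd_getD _ (PySem.List.nodup_pyRange_one _ _) _ _ ?hwr j]
        case hwr =>
          intro x hx
          rw [PySem.List.mem_pyRange_one] at hx
          rw [hlenrep]
          omega
        rw [getD_replicate]
        by_cases hmem : (j : Int) ∈ PySem.List.pyRange (i + 1) (min t (cum + s) + 1) 1
        · -- inside the written range: the convolution value
          rw [if_pos hmem]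
          rw [PySem.List.mem_pyRange_one] at hmem
          set K : Nat := (min ((j : Int) - i) s).toNat with hK
          have hKeq : min ((j : Int) - i) s = (K : Int) := by omega
          have hK1 : 1 ≤ K := by omega
          have hVj : V j = ∑ k ∈ Finset.range K,
              PySem.List.pyGetD w ((j : Int) - (1 + (k : Int))) 0 * pyComb s (1 + (k : Int)) := by
            rw [hV]
            simp only
            rw [hKeq, sum_map_pyRange_one]
          rw [hVj]
          have hterm : ∀ k ∈ Finset.range K,
              PySem.List.pyGetD w ((j : Int) - (1 + (k : Int))) 0 * pyComb s (1 + (k : Int))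
                = ((σ.choose (k + 1) * G P (j - (k + 1)) : Nat) : Int) := by
            intro k hk
            rw [Finset.mem_range] at hk
            have hidx : (j : Int) - (1 + (k : Int)) = ((j - (1 + k) : Nat) : Int) := by omega
            rw [hidx, hG _ (by omega)]
            have hcomb : pyComb s (1 + (k : Int)) = ((σ.choose (k + 1) : Nat) : Int) := by
              unfold pyComb
              rw [if_pos (by omega)]
              have h1 : (1 + (k : Int)).toNat = k + 1 := by omega
              have h2 : σ = s.toNat := by omega
              rw [h1, h2]
            rw [hcomb]
            have : j - (1 + k) = j - (k + 1) := by omega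
            rw [this]
            push_cast
            ring
          rw [Finset.sum_congr rfl hterm]
          rw [← Nat.cast_sum]
          have hGj : G (σ :: P) j = ∑ k ∈ Finset.range K, σ.choose (k + 1) * G P (j - (k + 1)) := by
            simp only [G]
            rw [Finset.sum_subset (by intro x hx; simp only [Finset.mem_range] at *; omega : Finset.range K ⊆ Finset.range j)]
            intro k hk hk2
            rw [Finset.mem_range] at hk
            rw [Finset.mem_range, not_lt] at hk2
            by_cases hkσ : k + 1 ≤ σ
            · have : j - (k + 1) < P.length := by omega
              rw [G_eq_zero_of_lt_length _ _ this, Nat.mul_zero]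
            · rw [Nat.choose_eq_zero_of_lt (by omega), Nat.zero_mul]
          rw [hGj]
          simp
        · -- outside: zero on both sides
          rw [if_neg hmem]
          rw [PySem.List.mem_pyRange_one] at hmem
          simp only [not_and, not_lt] at hmem
          have hcases : (j : Int) < i + 1 ∨ cum + s < (j : Int) := by
            by_cases h1 : (j : Int) < i + 1
            · exact Or.inl h1
            · right
              have := hmem (by omega)
              omega
          have : G (σ :: P) j = 0 := by
            rcases hcases with h1 | h1
            · exact G_eq_zero_of_lt_length _ _ (by simp [hPlen]; omega)
            · by_cases h0 : (0 : Nat) ∈ σ :: P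
              · exact G_eq_zero_of_zero_mem _ _ h0
              · -- every raw cell is ≥ 1, so the clamped sum is the raw sum
                have hall : ∀ x ∈ aCells cell_sizes i ++ [s], 1 ≤ x := by
                  intro x hx
                  rcases List.mem_append.mp hx with hx | hx
                  · -- x's clamp is a member of P
                    have hxP : (max x 0).toNat ∈ P := by
                      rw [hP, List.mem_reverse]
                      unfold clampList
                      exact List.mem_map_of_mem hx
                    have : (max x 0).toNat ≠ 0 := by
                      intro he
                      exact h0 (List.mem_cons_of_mem _ (he ▸ hxP))
                    omega
                  · simp at hx
                    omega
                have hsum : ((σ :: P).sum : Int) = cum + s := by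
                  have h1 : (σ :: P).sum = (clampList (aCells cell_sizes i ++ [s])).sum := by
                    rw [hP]
                    unfold clampList
                    rw [List.map_append]
                    simp [hσ]
                    omega
                  rw [h1]
                  unfold clampList
                  rw [sum_clamp_eq _ hall, List.sum_append]
                  simp [hcellsum]
                apply G_eq_zero_of_sum_lt
                omega
          rw [this]
          rfl

-- ===== VERDICT (by name: the statement is the Claim_ definition above) =====
theorem cellsel_compute_py_spec : Claim_equal_cellsel_compute_py := by
  intro cs nc t _ hpre
  obtain ⟨hne, ht, hnc⟩ := hpre
  unfold Spec_cellsel_compute_py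
  set n : Nat := (nc - 1).toNat with hn
  have hrange : PySem.List.pyRange 1 nc 1 = PySem.List.pyRange 1 (1 + (n : Int)) 1 := by
    by_cases h1 : 1 ≤ nc
    · have : (1 : Int) + (n : Int) = nc := by omega
      rw [this]
    · rw [PySem.List.pyRange_one_eq_nil (by omega), PySem.List.pyRange_one_eq_nil (by omega)]
  have hcl : aCells cs nc = aCells cs (1 + (n : Int)) := by
    unfold aCells; rw [hrange]
  set np : List Nat := clampList (aCells cs nc) with hnp
  -- A's value is G of the reversed clamped cell list
  obtain ⟨hlen, hcum, hG⟩ := a_inv cs t ht n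
  have hA : cellsel_compute_py cs nc t = ((G np.reverse t.toNat : Nat) : Int) := by
    have h1 := hG t.toNat le_rfl
    rw [Int.toNat_of_nonneg ht] at h1
    unfold cellsel_compute_py
    rw [hrange, h1, hnp, hcl]
  -- B's value is the IE sum over the clamped cell list
  set sizes : List Int := (aCells cs nc).map (fun s => max s 0) with hsizes
  have hl : ∀ x ∈ sizes, 0 ≤ x := by
    intro x hx
    rw [hsizes] at hx
    rcases List.mem_map.mp hx with ⟨y, _, hy⟩
    omega
  have hBfold : cellsel_compute_py_alt cs nc t
      = (sizes.foldl bStep (PySem.Dict.mk [(0, 1)])).items.foldl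
          (fun acc mc => acc + mc.2 * pyComb (sizes.sum - mc.1) t) 0 := rfl
  have hnd0 : (PySem.Dict.mk [((0 : Int), (1 : Int))]).keys.Nodup := by decide
  have hinv0 : ∀ f : Int → Int,
      wsum (PySem.Dict.mk [((0 : Int), (1 : Int))]).items f = IE [] (fun m => f (m : Int)) := by
    intro f
    simp [wsum, IE]
  obtain ⟨_, hbw⟩ := b_fold_inv sizes hl [] _ hnd0 hinv0
  have hmapnp : sizes.map Int.toNat = np := by
    rw [hsizes, hnp, List.map_map]
    rfl
  have hB : cellsel_compute_py_alt cs nc t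
      = IE np (fun m => pyComb (sizes.sum - (m : Int)) t) := by
    rw [hBfold, PySem.List.foldl_add]
    have := hbw (fun m => pyComb (sizes.sum - m) t)
    rw [List.nil_append, hmapnp] at this
    rw [show ((sizes.foldl bStep (PySem.Dict.mk [(0, 1)])).items.map
        (fun mc => mc.2 * pyComb (sizes.sum - mc.1) t)).sum
      = wsum (sizes.foldl bStep (PySem.Dict.mk [(0, 1)])).items
          (fun m => pyComb (sizes.sum - m) t) from rfl]
    rw [this]
    ring
  have hsum : ((np.sum : Nat) : Int) = sizes.sum := by
    rw [← hmapnp]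
    exact sum_toNat_of_nonneg sizes hl
  have hIE : IE np (fun m => pyComb (sizes.sum - (m : Int)) t)
      = IE np (fun m => ((np.sum - m).choose t.toNat : Nat)) := by
    apply IE_congr_on
    intro m hm
    unfold pyComb
    rw [if_pos (by omega)]
    have h1 : (sizes.sum - (m : Int)).toNat = np.sum - m := by omega
    rw [h1]
  rw [hA, hB, hIE]
  rw [G_eq_IE np.reverse t.toNat, List.sum_reverse, IE_reverse]
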